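-- pv_equiv track=rewrite | github.com/jampat000/Fetcher | app/refiner_service.py | _pick_primary_actionable_reason
-- ===== SOURCE A (Python) =====
-- def _parent_actionable_reason(raw: str) -> str:
--     s = (raw or "").replace("\r\n", "\n").replace("\r", "\n").strip()
--     if not s:
--         return ""
--     line = next((ln.strip() for ln in s.splitlines() if ln.strip()), "")
--     if not line:
--         return ""
--     low = line.lower()
--     if low.startswith("traceback") or line.startswith("{") or line.startswith("["):
--         return ""
--     if len(line) > 180:
--         line = line[:177].rstrip() + "..."
--     return line
--
-- def _pick_primary_actionable_reason(reasons: list[str]) -> str: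
--     cleaned: list[str] = []
--     for r in reasons:
--         cr = _parent_actionable_reason(r)
--         if cr:
--             cleaned.append(cr)
--     if not cleaned:
--         return ""
--     # Prefer most common reason; tie-break by most recent occurrence in this run.
--     counts: dict[str, int] = {}
--     last_idx: dict[str, int] = {}
--     for idx, reason in enumerate(cleaned):
--         counts[reason] = counts.get(reason, 0) + 1
--         last_idx[reason] = idx
--     return max(counts.keys(), key=lambda r: (counts[r], last_idx[r]))
-- ===== SOURCE B (Python) =====
-- def _parent_actionable_reason(raw: str) -> str:
--     s = (raw or "").replace("\r\n", "\n").replace("\r", "\n").strip()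
--     if not s:
--         return ""
--     line = next((ln.strip() for ln in s.splitlines() if ln.strip()), "")
--     if not line:
--         return ""
--     low = line.lower()
--     if low.startswith("traceback") or line.startswith("{") or line.startswith("["):
--         return ""
--     if len(line) > 180:
--         line = line[:177].rstrip() + "..."
--     return line
--
-- def _pick_primary_actionable_reason(reasons: list[str]) -> str:
--     # One online pass: clean each reason as it arrives, bump its running count,
--     # and keep the current winner; a >= update makes the most recent reason win ties.
--     best = ""
--     best_count = 0
--     counts: dict[str, int] = {}
--     for r in reasons:
--         cr = _parent_actionable_reason(r)
--         if not cr: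
--             continue
--         c = counts.get(cr, 0) + 1
--         counts[cr] = c
--         if c >= best_count:
--             best = cr
--             best_count = c
--     return best
-- ===== Notes on version B (the rewrite author's own statement) =====
-- stated objective: alternative
-- what changed: B replaces A's staged pipeline (build cleaned list, then a counting/last_idx loop over enumerate, then max over the dict keys with a (count, last_idx) key) by ONE online pass over reasons that cleans each item, bumps its running count, and keeps the current winner with a >=-update so the most recent reason wins ties; no cleaned list, no last_idx dict and no max call remain.
import Mathlib
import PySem

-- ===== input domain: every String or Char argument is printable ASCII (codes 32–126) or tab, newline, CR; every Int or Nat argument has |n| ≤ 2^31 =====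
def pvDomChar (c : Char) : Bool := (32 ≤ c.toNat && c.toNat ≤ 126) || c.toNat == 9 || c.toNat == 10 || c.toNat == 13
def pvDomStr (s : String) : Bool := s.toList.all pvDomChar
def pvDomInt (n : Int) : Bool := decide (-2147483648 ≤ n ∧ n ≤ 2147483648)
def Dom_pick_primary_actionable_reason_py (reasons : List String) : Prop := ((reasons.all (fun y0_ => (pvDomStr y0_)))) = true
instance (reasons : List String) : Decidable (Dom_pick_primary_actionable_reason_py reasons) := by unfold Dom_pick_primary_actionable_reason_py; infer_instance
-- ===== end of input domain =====

-- B replaces A's staged passes (cleaned list, counting/last_idx loop, max over dict keys) by one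
-- online pass that cleans, counts and keeps a running winner (>= update = most-recent tie-break).


-- ===== PORT A =====
-- shared helper: _parent_actionable_reason (both Pythons define it identically)
def parent_actionable_reason_py (raw : String) : String :=
  -- s = (raw or "").replace("\r\n", "\n").replace("\r", "\n").strip()
  let s := PySem.Str.strip (PySem.Str.replace (PySem.Str.replace (if raw = "" then "" else raw) "\r\n" "\n") "\r" "\n")
  if s = "" then ""
  else
    -- line = next((ln.strip() for ln in s.splitlines() if ln.strip()), "")
    let line := (((PySem.Str.splitlines s).map (fun ln => PySem.Str.strip ln)).find? (fun t => t ≠ "")).getD ""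
    if line = "" then ""
    else
      let low := PySem.Str.lower line
      if PySem.Str.startswith low "traceback" || PySem.Str.startswith line "{" || PySem.Str.startswith line "[" then ""
      else if PySem.Str.len line > 180 then PySem.Str.rstrip (PySem.Str.slice line none (some 177)) ++ "..."
      else line

def pick_primary_actionable_reason_py (reasons : List String) : String :=
  let cleaned := reasons.foldl (fun acc r =>
    let cr := parent_actionable_reason_py r
    if cr ≠ "" then acc ++ [cr] else acc) []
  if cleaned = [] then ""
  else
    -- one loop over enumerate(cleaned) building counts and last_idx
    let st := (PySem.List.enumerate cleaned).foldl
      (fun st p => (st.1.insert p.2 (st.1.getD p.2 0 + 1), st.2.insert p.2 p.1))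
      ((PySem.Dict.empty : PySem.Dict String Int), (PySem.Dict.empty : PySem.Dict String Int))
    -- max(counts.keys(), key=lambda r: (counts[r], last_idx[r])); getD is exact: every key is present;
    -- counts.keys() is nonempty here so the none branch is unreachable (Python max would raise only on empty)
    match PySem.List.max2? st.1.keys (fun r => st.1.getD r 0) (fun r => st.2.getD r 0) with
    | some m => m
    | none => ""

-- ===== PORT B =====
-- one online pass: best so far, its count, and the running counts dict
def pick_primary_actionable_reason_py_alt (reasons : List String) : String :=
  (reasons.foldl (fun st r =>
      let cr := parent_actionable_reason_py r
      if cr = "" then st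
      else
        let c := st.2.2.getD cr 0 + 1
        let counts := st.2.2.insert cr c
        if st.2.1 ≤ c then (cr, c, counts) else (st.1, st.2.1, counts))
    (("", 0, PySem.Dict.empty) : String × Int × PySem.Dict String Int)).1

-- ===== PRECONDITION & SPEC =====
def Spec_pick_primary_actionable_reason_py (reasons : List String) (out : String) : Prop := out = pick_primary_actionable_reason_py_alt reasons
instance (reasons : List String) (out : String) : Decidable (Spec_pick_primary_actionable_reason_py reasons out) := by unfold Spec_pick_primary_actionable_reason_py; infer_instance

-- ===== CLAIM (what is proved, stated in full; the proofs are below) =====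
def Claim_equal_pick_primary_actionable_reason_py : Prop := ∀ (reasons : List String), Dom_pick_primary_actionable_reason_py reasons → Spec_pick_primary_actionable_reason_py reasons (pick_primary_actionable_reason_py reasons)

-- ===== LEMMAS AND PROOFS =====

-- the maximal count in c (A's max(counts.values()) in effect)
def Mval (c : List String) : Int :=
  (PySem.List.max? (PySem.Dict.counter c : PySem.Dict String Int).values (fun v => v)).getD 0

-- most frequent element, ties by most recent occurrence, as a back-to-front scan
def rfSel (c : List String) : String :=
  match c.reverse.find? (fun x => (PySem.Dict.counter c : PySem.Dict String Int).getD x 0 == Mval c) with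
  | some m => m
  | none => ""

-- B's per-cleaned-element step
def selStep (st : String × Int × PySem.Dict String Int) (x : String) : String × Int × PySem.Dict String Int :=
  let c := st.2.2.getD x 0 + 1
  let counts := st.2.2.insert x c
  if st.2.1 ≤ c then (x, c, counts) else (st.1, st.2.1, counts)

-- A's cleaning step
def cleanStep (acc : List String) (r : String) : List String :=
  let cr := parent_actionable_reason_py r
  if cr ≠ "" then acc ++ [cr] else acc

lemma cleanStep_eq (L : List String) (r : String) : cleanStep L r = L ++ cleanStep [] r := by
  by_cases h : parent_actionable_reason_py r = "" <;> simp [cleanStep, h]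

lemma clean_acc (rs : List String) : ∀ L : List String, rs.foldl cleanStep L = L ++ rs.foldl cleanStep [] := by
  induction rs with
  | nil => intro L; simp
  | cons r t ih =>
    intro L
    rw [List.foldl_cons, List.foldl_cons, ih (cleanStep L r), ih (cleanStep [] r),
        cleanStep_eq L r, List.append_assoc]

lemma mem_clean (rs : List String) : ∀ x ∈ rs.foldl cleanStep [], x ≠ "" := by
  induction rs with
  | nil => intro x hx; simp at hx
  | cons r t ih =>
    intro x hx
    rw [List.foldl_cons, clean_acc] at hx
    rcases List.mem_append.mp hx with h | h
    · by_cases hc : parent_actionable_reason_py r = ""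
      · simp [cleanStep, hc] at h
      · simp [cleanStep, hc] at h
        exact h ▸ hc
    · exact ih x h

-- B's fold over reasons = selStep fold over the cleaned list
lemma fold_bridge (rs : List String) : ∀ st : String × Int × PySem.Dict String Int,
    rs.foldl (fun st r =>
      let cr := parent_actionable_reason_py r
      if cr = "" then st
      else
        let c := st.2.2.getD cr 0 + 1
        let counts := st.2.2.insert cr c
        if st.2.1 ≤ c then (cr, c, counts) else (st.1, st.2.1, counts)) st
    = (rs.foldl cleanStep []).foldl selStep st := by
  induction rs with
  | nil => intro st; simp
  | cons r t ih =>
    intro st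
    have harg : ∀ st : String × Int × PySem.Dict String Int,
        (let cr := parent_actionable_reason_py r
         if cr = "" then st else
           let c := st.2.2.getD cr 0 + 1
           let counts := st.2.2.insert cr c
           if st.2.1 ≤ c then (cr, c, counts) else (st.1, st.2.1, counts))
        = (cleanStep [] r).foldl selStep st := by
      intro st
      unfold cleanStep
      generalize parent_actionable_reason_py r = cr
      by_cases h : cr = "" <;> simp [selStep, h]
    simp only [List.foldl_cons]
    rw [ih, clean_acc t (cleanStep [] r), List.foldl_append, harg st]

lemma counter_snoc (d : List String) (y : String) :
    (PySem.Dict.counter (d ++ [y]) : PySem.Dict String Int)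
      = (PySem.Dict.counter d : PySem.Dict String Int).insert y
          ((PySem.Dict.counter d : PySem.Dict String Int).getD y 0 + 1) := by
  rw [← PySem.Dict.foldl_insert_getD_add_one_eq_counter (d ++ [y]),
      ← PySem.Dict.foldl_insert_getD_add_one_eq_counter d, List.foldl_append]
  rfl

lemma M_upper (c : List String) : ∀ x ∈ c, (c.count x : Int) ≤ Mval c := by
  intro x hx
  have hnd := PySem.Dict.nodup_keys_counter (κ := String) c
  have hk : x ∈ (PySem.Dict.counter c : PySem.Dict String Int).keys := by
    rw [PySem.Dict.keys_counter]; exact (PySem.Set.mem_ofList c x).mpr hx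
  have hv : ((PySem.Dict.counter c : PySem.Dict String Int).getD x 0)
      ∈ (PySem.Dict.counter c : PySem.Dict String Int).values := by
    rw [PySem.Dict.values_eq_map_keys _ hnd 0]
    exact List.mem_map.mpr ⟨x, hk, rfl⟩
  cases hM : PySem.List.max? (PySem.Dict.counter c : PySem.Dict String Int).values (fun v => v) with
  | none =>
    rw [PySem.List.max?_eq_none_iff] at hM
    rw [hM] at hv; simp at hv
  | some M =>
    have := PySem.List.max?_isMax hM _ hv
    rw [PySem.Dict.getD_counter] at this
    unfold Mval
    rw [hM]
    exact this

lemma M_mem (c : List String) (hc : c ≠ []) : ∃ x ∈ c, (c.count x : Int) = Mval c := by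
  have hnd := PySem.Dict.nodup_keys_counter (κ := String) c
  obtain ⟨x0, hx0⟩ : ∃ x, x ∈ c := by
    cases c with
    | nil => exact absurd rfl hc
    | cons a t => exact ⟨a, List.mem_cons_self⟩
  have hvne : (PySem.Dict.counter c : PySem.Dict String Int).values ≠ [] := by
    rw [PySem.Dict.values_eq_map_keys _ hnd 0]
    intro h
    have hk : x0 ∈ (PySem.Dict.counter c : PySem.Dict String Int).keys := by
      rw [PySem.Dict.keys_counter]; exact (PySem.Set.mem_ofList c x0).mpr hx0
    rw [List.map_eq_nil_iff.mp h] at hk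
    simp at hk
  cases hM : PySem.List.max? (PySem.Dict.counter c : PySem.Dict String Int).values (fun v => v) with
  | none => exact absurd ((PySem.List.max?_eq_none_iff _ _).mp hM) hvne
  | some M =>
    have hmem := PySem.List.max?_mem hM
    rw [PySem.Dict.values_eq_map_keys _ hnd 0] at hmem
    rcases List.mem_map.mp hmem with ⟨k, hkK, hkM⟩
    have hkc : k ∈ c := (PySem.Set.mem_ofList c k).mp ((PySem.Dict.keys_counter c) ▸ hkK)
    refine ⟨k, hkc, ?_⟩
    rw [← PySem.Dict.getD_counter c k, hkM]
    unfold Mval; rw [hM]; rfl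

lemma M_unique (c : List String) (m : Int) (hw : ∃ x ∈ c, (c.count x : Int) = m)
    (hu : ∀ x ∈ c, (c.count x : Int) ≤ m) : m = Mval c := by
  rcases hw with ⟨x, hx, hxm⟩
  have h1 : m ≤ Mval c := hxm ▸ M_upper c x hx
  rcases M_mem c (by intro h; rw [h] at hx; simp at hx) with ⟨x', hx', hx'M⟩
  have h2 : Mval c ≤ m := hx'M ▸ hu x' hx'
  omega

lemma find?_congr_mem {α : Type} {p q : α → Bool} : ∀ l : List α, (∀ x ∈ l, p x = q x) → l.find? p = l.find? q := by
  intro l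
  induction l with
  | nil => intro _; rfl
  | cons a t ih =>
    intro h
    simp only [List.find?_cons]
    rw [h a List.mem_cons_self]
    cases q a
    · exact ih (fun x hx => h x (List.mem_cons_of_mem _ hx))
    · rfl

lemma count_snoc (d : List String) (y x : String) :
    (d ++ [y]).count x = d.count x + if y = x then 1 else 0 := by
  rw [List.count_append]
  congr 1
  by_cases h : y = x <;> simp [h]

-- the online fold computes (rfSel, Mval, counter)
lemma online (c : List String) (h : ∀ x ∈ c, x ≠ "") :
    c.foldl selStep (("", 0, PySem.Dict.empty) : String × Int × PySem.Dict String Int)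
      = (rfSel c, Mval c, PySem.Dict.counter c) := by
  induction c using List.reverseRecOn with
  | nil => rfl
  | append_singleton d y ih =>
    have hd : ∀ x ∈ d, x ≠ "" := fun x hx => h x (List.mem_append.mpr (Or.inl hx))
    rw [List.foldl_append, ih hd, List.foldl_cons, List.foldl_nil]
    have hcy : (PySem.Dict.counter d : PySem.Dict String Int).getD y 0 = (d.count y : Int) :=
      PySem.Dict.getD_counter d y
    have hcnty : ((d ++ [y]).count y : Int) = (d.count y : Int) + 1 := by
      rw [count_snoc]; simp
    have hcntx : ∀ x, x ≠ y → ((d ++ [y]).count x : Int) = (d.count x : Int) := by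
      intro x hxy
      rw [count_snoc]
      simp [Ne.symm hxy]
    have hrev : (d ++ [y]).reverse = y :: d.reverse := by simp
    simp only [selStep, hcy]
    by_cases hle : Mval d ≤ (d.count y : Int) + 1
    · rw [if_pos hle]
      have hM : (d.count y : Int) + 1 = Mval (d ++ [y]) := by
        apply M_unique
        · exact ⟨y, List.mem_append.mpr (Or.inr List.mem_cons_self), hcnty ▸ rfl⟩
        · intro x hx
          by_cases hxy : x = y
          · subst hxy; rw [hcnty]
          · rw [hcntx x hxy]
            have hxd : x ∈ d := by
              rcases List.mem_append.mp hx with h1 | h1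
              · exact h1
              · simp only [List.mem_singleton] at h1; exact absurd h1 hxy
            exact le_trans (M_upper d x hxd) hle
      have hsel : rfSel (d ++ [y]) = y := by
        unfold rfSel
        rw [hrev, List.find?_cons]
        have : ((PySem.Dict.counter (d ++ [y]) : PySem.Dict String Int).getD y 0 == Mval (d ++ [y])) = true := by
          rw [PySem.Dict.getD_counter, ← hM, hcnty]
          exact beq_self_eq_true _
        rw [this]
      rw [hsel, ← hM, counter_snoc, hcy]
    · rw [if_neg hle]
      rw [not_le] at hle
      have hdne : d ≠ [] := by
        intro hnil
        subst hnil
        simp only [List.count_nil, Nat.cast_zero, zero_add] at hle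
        have : Mval ([] : List String) = 0 := rfl
        omega
      have hM : Mval d = Mval (d ++ [y]) := by
        apply M_unique
        · rcases M_mem d hdne with ⟨x0, hx0, hx0M⟩
          have hx0y : x0 ≠ y := by
            intro he
            subst he
            omega
          exact ⟨x0, List.mem_append.mpr (Or.inl hx0), by rw [hcntx x0 hx0y]; exact hx0M⟩
        · intro x hx
          by_cases hxy : x = y
          · subst hxy; rw [hcnty]; omega
          · rw [hcntx x hxy]
            have hxd : x ∈ d := by
              rcases List.mem_append.mp hx with h1 | h1
              · exact h1
              · simp only [List.mem_singleton] at h1; exact absurd h1 hxy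
            exact M_upper d x hxd
      have hsel : rfSel (d ++ [y]) = rfSel d := by
        unfold rfSel
        rw [hrev, List.find?_cons]
        have hpy : ((PySem.Dict.counter (d ++ [y]) : PySem.Dict String Int).getD y 0 == Mval (d ++ [y])) = false := by
          rw [PySem.Dict.getD_counter, ← hM, hcnty, beq_eq_false_iff_ne]
          omega
        rw [hpy]
        have : (d.reverse.find? (fun x => (PySem.Dict.counter (d ++ [y]) : PySem.Dict String Int).getD x 0 == Mval (d ++ [y])))
             = (d.reverse.find? (fun x => (PySem.Dict.counter d : PySem.Dict String Int).getD x 0 == Mval d)) := by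
          apply find?_congr_mem
          intro x hx
          by_cases hxy : x = y
          · rw [hxy, hpy]
            symm
            rw [PySem.Dict.getD_counter, beq_eq_false_iff_ne]
            have := M_upper d y (List.mem_reverse.mp (hxy ▸ hx))
            omega
          · rw [PySem.Dict.getD_counter, PySem.Dict.getD_counter, ← hM, hcntx x hxy]
        rw [this]
      rw [hsel, ← hM, counter_snoc, hcy]

-- ========== A-side characterization (max2? over (count, last_idx) = rfSel) ==========

-- `j` is the index of the LAST occurrence of `r` in `c`
def LastAt (c : List String) (r : String) (j : Nat) : Prop :=
  ∃ v, c.drop j = r :: v ∧ r ∉ v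

-- lexicographic ≤ on the key pair (k1, k2) used by A's max
def lexLe (k1 k2 : String → Int) (y m : String) : Prop :=
  k1 y < k1 m ∨ (k1 y = k1 m ∧ k2 y ≤ k2 m)

-- the body of the fold inside PySem.List.max2?, as a named function
def m2step (k1 k2 : String → Int) (acc : Option String) (x : String) : Option String :=
  match acc with
  | none => some x
  | some m => if (decide (k1 m < k1 x) || !decide (k1 x < k1 m) && decide (k2 m < k2 x)) = true
              then some x else some m

lemma drop_subset_drop (c : List String) {n m : Nat} (h : n ≤ m) : c.drop m ⊆ c.drop n := by
  intro x hx
  have he : c.drop m = (c.drop n).drop (m - n) := by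
    rw [List.drop_drop]; congr 1; omega
  rw [he] at hx
  exact List.drop_subset _ _ hx

lemma lastAt_le_of_lastAt {c : List String} {r r' : String} {j j' : Nat}
    (h : LastAt c r j) (h' : r' ∈ c.drop j') (hlt : j < j') : r ≠ r' := by
  rcases h with ⟨v, hd, hv⟩
  intro he
  subst he
  have hdj1 : c.drop (j + 1) = v := by
    have h2 : c.drop (j + 1) = (c.drop j).drop 1 := by rw [List.drop_drop, Nat.add_comm]
    rw [h2, hd]; rfl
  have : r ∈ c.drop (j + 1) := drop_subset_drop c (by omega) h'
  exact hv (hdj1 ▸ this)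

lemma lastAt_unique {c : List String} {r : String} {j j' : Nat}
    (h : LastAt c r j) (h' : LastAt c r j') : j = j' := by
  by_contra hne
  rcases Nat.lt_or_ge j j' with hlt | hge
  · rcases h' with ⟨v', hd', _⟩
    exact lastAt_le_of_lastAt h (by rw [hd']; exact List.mem_cons_self) hlt rfl
  · rcases h with ⟨v, hd, _⟩
    exact lastAt_le_of_lastAt h' (by rw [hd]; exact List.mem_cons_self) (by omega) rfl

lemma lastAt_eq_at {c : List String} {r r' : String} {j : Nat}
    (h : LastAt c r j) (h' : LastAt c r' j) : r = r' := by
  rcases h with ⟨v, hd, _⟩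
  rcases h' with ⟨v', hd', _⟩
  rw [hd] at hd'
  exact (List.cons_eq_cons.mp hd').1

-- the last_idx fold leaves keys not in c alone
lemma getD_enumfold_not_mem (c : List String) : ∀ (k : Int) (d : PySem.Dict String Int)
    (r : String) (dflt : Int), r ∉ c →
    ((PySem.List.enumerate c k).foldl (fun d p => d.insert p.2 p.1) d).getD r dflt = d.getD r dflt := by
  induction c with
  | nil => intro k d r dflt _; simp [PySem.List.enumerate]
  | cons x t ih =>
    intro k d r dflt h
    simp only [PySem.List.enumerate, List.foldl_cons]
    rw [ih (k + 1) _ r dflt (fun hm => h (List.mem_cons_of_mem _ hm)), PySem.Dict.getD_insert,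
      if_neg (fun (he : r = x) => h (he ▸ List.mem_cons_self))]

-- the last_idx fold stores k + (index of the last occurrence)
lemma getD_enumfold_last (c : List String) : ∀ (k : Int) (d : PySem.Dict String Int)
    (r : String) (dflt : Int), r ∈ c →
    ∃ j : Nat, LastAt c r j ∧
      ((PySem.List.enumerate c k).foldl (fun d p => d.insert p.2 p.1) d).getD r dflt = k + j := by
  induction c with
  | nil => intro _ _ _ _ h; simp at h
  | cons x t ih =>
    intro k d r dflt h
    simp only [PySem.List.enumerate, List.foldl_cons]
    by_cases hm : r ∈ t
    · rcases ih (k + 1) (d.insert x k) r dflt hm with ⟨j, ⟨v, hd, hv⟩, hEq⟩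
      refine ⟨j + 1, ⟨v, ?_, hv⟩, ?_⟩
      · rw [List.drop_succ_cons]; exact hd
      · rw [hEq]; push_cast; ring
    · have hrx : r = x := by
        rcases List.mem_cons.mp h with h1 | h1
        · exact h1
        · exact absurd h1 hm
      subst hrx
      refine ⟨0, ⟨t, by simp, hm⟩, ?_⟩
      rw [getD_enumfold_not_mem t (k + 1) _ r dflt hm, PySem.Dict.getD_insert, if_pos rfl]
      simp

lemma max2?_eq_m2step (xs : List String) (k1 k2 : String → Int) :
    PySem.List.max2? xs k1 k2 = xs.foldl (m2step k1 k2) none := by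
  unfold PySem.List.max2?
  refine PySem.List.foldl_congr_mem _ _ _ _ ?_
  intro acc x _
  cases acc <;> rfl

lemma m2step_cond_true {k1 k2 : String → Int} {a x : String}
    (hc : (decide (k1 a < k1 x) || !decide (k1 x < k1 a) && decide (k2 a < k2 x)) = true) :
    lexLe k1 k2 a x := by
  simp only [Bool.or_eq_true, Bool.and_eq_true, Bool.not_eq_eq_eq_not, Bool.not_true,
    decide_eq_true_eq, decide_eq_false_iff_not] at hc
  unfold lexLe
  rcases hc with h1 | ⟨h1, h2⟩
  · exact Or.inl h1
  · omega

lemma m2step_cond_false {k1 k2 : String → Int} {a x : String}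
    (hc : ¬ ((decide (k1 a < k1 x) || !decide (k1 x < k1 a) && decide (k2 a < k2 x)) = true)) :
    lexLe k1 k2 x a := by
  simp only [Bool.or_eq_true, Bool.and_eq_true, Bool.not_eq_eq_eq_not, Bool.not_true,
    decide_eq_true_eq, decide_eq_false_iff_not, not_or, not_and, not_lt] at hc
  unfold lexLe
  rcases hc with ⟨h1, h2⟩
  rcases lt_or_eq_of_le h1 with h3 | h3
  · exact Or.inl h3
  · exact Or.inr ⟨h3.symm ▸ rfl, by omega⟩

lemma lexLe_trans {k1 k2 : String → Int} {a b c : String}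
    (h1 : lexLe k1 k2 a b) (h2 : lexLe k1 k2 b c) : lexLe k1 k2 a c := by
  unfold lexLe at *
  rcases h1 with h1 | ⟨h1, h1'⟩ <;> rcases h2 with h2 | ⟨h2, h2'⟩ <;> omega

lemma lexLe_refl (k1 k2 : String → Int) (a : String) : lexLe k1 k2 a a :=
  Or.inr ⟨rfl, le_refl _⟩

-- the fold inside max2? starting from `some a` yields a lex-maximal element
lemma max2?_go (k1 k2 : String → Int) : ∀ (xs : List String) (a m : String),
    xs.foldl (m2step k1 k2) (some a) = some m →
    (m = a ∨ m ∈ xs) ∧ lexLe k1 k2 a m ∧ ∀ y ∈ xs, lexLe k1 k2 y m := by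
  intro xs
  induction xs with
  | nil =>
    intro a m h
    simp only [List.foldl_nil, Option.some.injEq] at h
    subst h
    exact ⟨Or.inl rfl, lexLe_refl _ _ _, by simp⟩
  | cons x t ih =>
    intro a m h
    simp only [List.foldl_cons] at h
    by_cases hc : (decide (k1 a < k1 x) || !decide (k1 x < k1 a) && decide (k2 a < k2 x)) = true
    · have hs : m2step k1 k2 (some a) x = some x := by simp only [m2step]; rw [if_pos hc]
      rw [hs] at h
      rcases ih x m h with ⟨hmem, hxm, hall⟩
      refine ⟨?_, lexLe_trans (m2step_cond_true hc) hxm, ?_⟩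
      · rcases hmem with h1 | h1
        · exact Or.inr (h1 ▸ List.mem_cons_self)
        · exact Or.inr (List.mem_cons_of_mem _ h1)
      · intro y hy
        rcases List.mem_cons.mp hy with h1 | h1
        · exact h1 ▸ hxm
        · exact hall _ h1
    · have hs : m2step k1 k2 (some a) x = some a := by simp only [m2step]; rw [if_neg hc]
      rw [hs] at h
      rcases ih a m h with ⟨hmem, ham, hall⟩
      refine ⟨?_, ham, ?_⟩
      · rcases hmem with h1 | h1
        · exact Or.inl h1
        · exact Or.inr (List.mem_cons_of_mem _ h1)
      · intro y hy
        rcases List.mem_cons.mp hy with h1 | h1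
        · exact h1 ▸ lexLe_trans (m2step_cond_false hc) ham
        · exact hall _ h1

lemma max2?_spec (xs : List String) (k1 k2 : String → Int) (m : String)
    (h : PySem.List.max2? xs k1 k2 = some m) :
    m ∈ xs ∧ ∀ y ∈ xs, lexLe k1 k2 y m := by
  rw [max2?_eq_m2step] at h
  cases xs with
  | nil => simp [List.foldl_nil] at h
  | cons x t =>
    simp only [List.foldl_cons] at h
    rw [show m2step k1 k2 none x = some x from rfl] at h
    rcases max2?_go k1 k2 t x m h with ⟨hmem, hxm, hall⟩
    refine ⟨?_, ?_⟩
    · rcases hmem with h1 | h1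
      · exact h1 ▸ List.mem_cons_self
      · exact List.mem_cons_of_mem _ h1
    · intro y hy
      rcases List.mem_cons.mp hy with h1 | h1
      · exact h1 ▸ hxm
      · exact hall _ h1

lemma max2?_isSome (xs : List String) (k1 k2 : String → Int) (h : xs ≠ []) :
    ∃ m, PySem.List.max2? xs k1 k2 = some m := by
  rw [max2?_eq_m2step]
  cases xs with
  | nil => exact absurd rfl h
  | cons x t =>
    clear h
    simp only [List.foldl_cons]
    rw [show m2step k1 k2 none x = some x from rfl]
    induction t generalizing x with
    | nil => exact ⟨x, rfl⟩
    | cons y t iht =>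
      simp only [List.foldl_cons]
      by_cases hc : (decide (k1 x < k1 y) || !decide (k1 y < k1 x) && decide (k2 x < k2 y)) = true
      · have hs : m2step k1 k2 (some x) y = some y := by simp only [m2step]; rw [if_pos hc]
        rw [hs]; exact iht y
      · have hs : m2step k1 k2 (some x) y = some x := by simp only [m2step]; rw [if_neg hc]
        rw [hs]; exact iht x

-- a fold over enumerate that only looks at the element is a fold over the list
lemma foldl_enum_snd (F : PySem.Dict String Int → String → PySem.Dict String Int) :
    ∀ (c : List String) (k : Int) (d : PySem.Dict String Int),
    (PySem.List.enumerate c k).foldl (fun d p => F d p.2) d = c.foldl F d := by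
  intro c
  induction c with
  | nil => intro k d; simp [PySem.List.enumerate]
  | cons x t ih =>
    intro k d
    simp only [PySem.List.enumerate, List.foldl_cons]
    exact ih _ _

-- A's selection on a nonempty cleaned list equals rfSel
lemma sel_gen (c : List String) (hc : c ≠ []) (K : PySem.Dict String Int)
    (hK : K.keys = PySem.Set.ofList c)
    (hcnt : ∀ r, K.getD r 0 = (c.count r : Int)) :
    (match PySem.List.max2? K.keys
        (fun r => K.getD r 0)
        (fun r => ((PySem.List.enumerate c).foldl (fun d p => d.insert p.2 p.1)
          (PySem.Dict.empty : PySem.Dict String Int)).getD r 0) with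
     | some m => m
     | none => "") = rfSel c := by
  obtain ⟨x0, hx0⟩ : ∃ x, x ∈ c := by
    cases c with
    | nil => exact absurd rfl hc
    | cons a t => exact ⟨a, List.mem_cons_self⟩
  have hkeysne : K.keys ≠ [] := by
    intro hnil
    have hx : x0 ∈ K.keys := by rw [hK]; exact (PySem.Set.mem_ofList c x0).mpr hx0
    rw [hnil] at hx
    simp at hx
  -- the back-to-front winner w
  obtain ⟨w, hw⟩ : ∃ w, c.reverse.find? (fun x => (PySem.Dict.counter c : PySem.Dict String Int).getD x 0 == Mval c) = some w := by
    rcases M_mem c hc with ⟨k0, hk0c, hk0⟩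
    refine Option.isSome_iff_exists.mp (List.find?_isSome.mpr ⟨k0, List.mem_reverse.mpr hk0c, ?_⟩)
    rw [PySem.Dict.getD_counter, hk0]
    exact beq_self_eq_true _
  obtain ⟨hPw, as, bs, hdecomp, has⟩ := List.find?_eq_some_iff_append.mp hw
  have hcw : c = bs.reverse ++ w :: as.reverse := by
    have h1 := congrArg List.reverse hdecomp
    simpa [List.reverse_append] using h1
  have hLw : LastAt c w bs.reverse.length := by
    refine ⟨as.reverse, ?_, ?_⟩
    · rw [hcw]; exact List.drop_left
    · intro hmem
      have h2 := has w (List.mem_reverse.mp hmem)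
      rw [hPw] at h2
      simp at h2
  have hdropL : c.drop (bs.reverse.length + 1) = as.reverse := by
    rw [hcw]
    have h3 : bs.reverse ++ w :: as.reverse = (bs.reverse ++ [w]) ++ as.reverse := by simp
    rw [h3]
    have hlen : (bs.reverse ++ [w]).length = bs.reverse.length + 1 := by simp
    rw [← hlen]
    exact List.drop_left
  have hbound : ∀ y (j : Nat), LastAt c y j → (c.count y : Int) = Mval c → j ≤ bs.reverse.length := by
    intro y j hLy hPy
    by_contra hgt
    rcases hLy with ⟨v, hdy, hvy⟩
    have hymem : y ∈ c.drop j := by rw [hdy]; exact List.mem_cons_self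
    have hyas : y ∈ as.reverse := by
      rw [← hdropL]
      exact drop_subset_drop c (by omega) hymem
    have hny := has y (List.mem_reverse.mp hyas)
    rw [PySem.Dict.getD_counter] at hny
    simp [hPy] at hny
  obtain ⟨m, hm⟩ := max2?_isSome K.keys
    (fun r => K.getD r 0)
    (fun r => ((PySem.List.enumerate c).foldl (fun d p => d.insert p.2 p.1)
      (PySem.Dict.empty : PySem.Dict String Int)).getD r 0) hkeysne
  rcases max2?_spec _ _ _ _ hm with ⟨hmK, hmall⟩
  rw [hm]
  unfold rfSel
  rw [hw]
  show m = w
  have hmc : m ∈ c := (PySem.Set.mem_ofList c m).mp (hK ▸ hmK)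
  have hwc : w ∈ c := by
    rw [hcw]
    exact List.mem_append.mpr (Or.inr List.mem_cons_self)
  have hwK : w ∈ K.keys := by rw [hK]; exact (PySem.Set.mem_ofList c w).mpr hwc
  have hcntm_le : (c.count m : Int) ≤ Mval c := M_upper c m hmc
  have hcntw : (c.count w : Int) = Mval c := by
    have h4 : ((PySem.Dict.counter c : PySem.Dict String Int).getD w 0 == Mval c) = true := hPw
    have := eq_of_beq h4
    rw [PySem.Dict.getD_counter] at this
    exact this
  rcases M_mem c hc with ⟨k0, hk0c, hk0⟩
  have hk0K : k0 ∈ K.keys := by rw [hK]; exact (PySem.Set.mem_ofList c k0).mpr hk0c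
  have hlex0 := hmall k0 hk0K
  have hcntm : (c.count m : Int) = Mval c := by
    simp only [lexLe, hcnt] at hlex0
    rw [hk0] at hlex0
    rcases hlex0 with h1 | ⟨h1, _⟩ <;> omega
  obtain ⟨jm, hLm, hdm⟩ := getD_enumfold_last c 0 PySem.Dict.empty m 0 hmc
  obtain ⟨jw, hLw_, hdw⟩ := getD_enumfold_last c 0 PySem.Dict.empty w 0 hwc
  have hjw : jw = bs.reverse.length := lastAt_unique hLw_ hLw
  have hjm_le : jm ≤ bs.reverse.length := hbound m jm hLm hcntm
  have hlexw := hmall w hwK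
  have hjwm : jw ≤ jm := by
    simp only [lexLe, hcnt] at hlexw
    rw [hcntm, hcntw] at hlexw
    rcases hlexw with h1 | ⟨_, h2⟩
    · omega
    · rw [hdm, hdw] at h2; omega
  have hjeq : jm = jw := by omega
  exact lastAt_eq_at hLm (hjeq ▸ hLw_)

-- A's body on a cleaned list c equals rfSel c
lemma A_eq_rfSel (c : List String) :
    (if c = [] then ""
     else
       let st := (PySem.List.enumerate c).foldl
         (fun st p => (st.1.insert p.2 (st.1.getD p.2 0 + 1), st.2.insert p.2 p.1))
         ((PySem.Dict.empty : PySem.Dict String Int), (PySem.Dict.empty : PySem.Dict String Int))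
       match PySem.List.max2? st.1.keys (fun r => st.1.getD r 0) (fun r => st.2.getD r 0) with
       | some m => m
       | none => "") = rfSel c := by
  by_cases hc : c = []
  · subst hc; rfl
  · rw [if_neg hc]
    rw [PySem.List.foldl_prod_mk
      (f := fun (d : PySem.Dict String Int) (p : Int × String) => d.insert p.2 (d.getD p.2 0 + 1))
      (g := fun (d : PySem.Dict String Int) (p : Int × String) => d.insert p.2 p.1)]
    have hcounter : (PySem.List.enumerate c).foldl
        (fun (d : PySem.Dict String Int) (p : Int × String) => d.insert p.2 (d.getD p.2 0 + 1))
        (PySem.Dict.empty : PySem.Dict String Int) = PySem.Dict.counter c := by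
      rw [foldl_enum_snd (fun d y => d.insert y (d.getD y 0 + 1)) c 0]
      exact PySem.Dict.foldl_insert_getD_add_one_eq_counter c
    simp only [hcounter]
    exact sel_gen c hc (PySem.Dict.counter c) (PySem.Dict.keys_counter c)
      (fun r => PySem.Dict.getD_counter c r)

-- ===== VERDICT (by name: the statement is the Claim_ definition above) =====
theorem pick_primary_actionable_reason_py_spec : Claim_equal_pick_primary_actionable_reason_py := by
  intro reasons _
  unfold Spec_pick_primary_actionable_reason_py
  unfold pick_primary_actionable_reason_py pick_primary_actionable_reason_py_alt
  rw [fold_bridge]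
  have hcl : ∀ x ∈ reasons.foldl cleanStep [], x ≠ "" := mem_clean reasons
  rw [online _ hcl]
  show _ = rfSel (reasons.foldl cleanStep [])
  exact A_eq_rfSel (reasons.foldl cleanStep [])
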